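-- pv_equiv track=rewrite | github.com/punkryn/problem-solving | 프로그래머스/lv3/131129. 카운트 다운/카운트 다운.py | solution
-- ===== SOURCE A (Python) =====
-- INF = int(10**9)
--
-- def solution(target):
--     answer = []
--
--     dp = [[INF, 0] for _ in range(target + 1)]
--     dp[0][0] = 0
--     for i in range(target):
--         for j in range(1, 21):
--             nxt = dp[i][0] + 1
--             nxtIdx = i + j
--             if nxtIdx <= target :
--                 if nxt < dp[nxtIdx][0]:
--                     dp[nxtIdx][0] = nxt
--                     dp[nxtIdx][1] = dp[i][1] + 1
--                 elif nxt == dp[nxtIdx][0]: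
--                     dp[nxtIdx][1] = max(dp[nxtIdx][1], dp[i][1] + 1)
--
--             nxtIdx = i + j * 2
--             if nxtIdx <= target:
--                 if nxt < dp[nxtIdx][0]:
--                     dp[nxtIdx][0] = nxt
--                     dp[nxtIdx][1] = dp[i][1]
--                 elif nxt == dp[nxtIdx][0]:
--                     dp[nxtIdx][1] = max(dp[nxtIdx][1], dp[i][1])
--
--             nxtIdx = i + j * 3
--             if nxtIdx <= target:
--                 if nxt < dp[nxtIdx][0]:
--                     dp[nxtIdx][0] = nxt
--                     dp[nxtIdx][1] = dp[i][1]
--                 elif nxt == dp[nxtIdx][0]: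
--                     dp[nxtIdx][1] = max(dp[nxtIdx][1], dp[i][1])
--
--         nxtIdx = i + 50
--         if nxtIdx <= target:
--             if nxt < dp[nxtIdx][0]:
--                 dp[nxtIdx][0] = nxt
--                 dp[nxtIdx][1] = dp[i][1] + 1
--             elif nxt == dp[nxtIdx][0]:
--                 dp[nxtIdx][1] = max(dp[nxtIdx][1], dp[i][1] + 1)
--
--     return dp[target]
-- ===== SOURCE B (Python) =====
-- INF = int(10**9)
--
-- def solution(target):
--     # Two staged passes over the distinct reachable per-dart values (deduplicated across single/double/triple/bull):
--     # pass 1 computes only the minimal dart count for every total,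
--     # pass 2 computes the maximal number of counting throws (singles 1..20 and
--     # the bull 50) along minimal-dart decompositions, with no tie-break pairs.
--     values = sorted(set(range(1, 21)) | set(range(2, 41, 2)) | set(range(3, 61, 3)) | {50})
--     mind = [0] + [INF] * target
--     for t in range(1, target + 1):
--         mind[t] = 1 + min(mind[t - v] for v in values if v <= t)
--     cnt = [0] * (target + 1)
--     for t in range(1, target + 1):
--         cnt[t] = max(cnt[t - v] + (1 if v <= 20 or v == 50 else 0)
--                      for v in values if v <= t and mind[t - v] + 1 == mind[t])
--     return [mind[target], cnt[target]]
-- ===== Notes on version B (the rewrite author's own statement) =====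
-- stated objective: alternative
-- what changed: A runs one combined push/scatter DP over lexicographic (min darts, max count) pairs with explicit less-than/tie branches relayed forward to single/double/triple/bull successors; B instead makes two staged scalar passes over the deduplicated set of reachable dart values: a plain coin-change pass computing only the minimal dart count, then a second pass computing the maximal number of counting throws by maximising over predecessors that the finished min-dart table certifies as optimal, with no pair state and no tie-break logic.
import Mathlib
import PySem

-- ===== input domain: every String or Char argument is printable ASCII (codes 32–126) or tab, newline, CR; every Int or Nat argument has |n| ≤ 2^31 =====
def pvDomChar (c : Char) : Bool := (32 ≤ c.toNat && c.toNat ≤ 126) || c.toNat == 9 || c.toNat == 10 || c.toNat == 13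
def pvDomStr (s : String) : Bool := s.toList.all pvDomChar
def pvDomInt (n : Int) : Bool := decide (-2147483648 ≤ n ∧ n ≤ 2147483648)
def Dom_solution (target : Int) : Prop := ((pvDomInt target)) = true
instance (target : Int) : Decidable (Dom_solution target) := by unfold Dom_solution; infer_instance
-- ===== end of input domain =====

-- B replaces A's one-pass push DP on lexicographic (min darts, max count) pairs with explicit
-- tie-break updates by two staged scalar passes over the deduplicated dart values: first the
-- min-dart table alone, then the count table read off the finished min-dart table (objective:
-- alternative, same asymptotic cost).

-- ===== PORT A =====
-- A's relaxation of cell `idx` (guarded by `idx <= target`) with candidate `cand = (darts, count)`: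
-- keep min darts, on a tie keep max count.  Mirrors the `if nxt < …: / elif nxt == …:` blocks of A.
def aRelax (T : Nat) (dp : List (Int × Int)) (idx : Nat) (cand : Int × Int) : List (Int × Int) :=
  if idx ≤ T then
    if cand.1 < (dp.getD idx (0, 0)).1 then dp.set idx cand
    else if cand.1 = (dp.getD idx (0, 0)).1 then
      dp.set idx ((dp.getD idx (0, 0)).1, max (dp.getD idx (0, 0)).2 cand.2)
    else dp
  else dp

-- one iteration of A's outer `for i in range(target)` loop: the `for j in range(1, 21)` loop with its
-- single/double/triple pushes, then the bull (i + 50) push.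
def aStep (T : Nat) (dp : List (Int × Int)) (i : Nat) : List (Int × Int) :=
  let dp1 := (List.range 20).foldl (fun dp j =>
      let src := dp.getD i (0, 0)
      let nxt := src.1 + 1
      let dp := aRelax T dp (i + (j + 1)) (nxt, src.2 + 1)
      let dp := aRelax T dp (i + 2 * (j + 1)) (nxt, src.2)
      aRelax T dp (i + 3 * (j + 1)) (nxt, src.2)) dp
  let src := dp1.getD i (0, 0)
  aRelax T dp1 (i + 50) (src.1 + 1, src.2 + 1)

def solution (target : Int) : List Int :=
  if target < 0 then []   -- Python A raises IndexError here (dp[0] on an empty dp); outside Pre_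
  else
    let T := target.toNat
    let dp0 := (List.replicate (T + 1) ((1000000000 : Int), (0 : Int))).set 0 (0, 0)
    let dp := (List.range T).foldl (aStep T) dp0
    [(dp.getD T (0, 0)).1, (dp.getD T (0, 0)).2]

-- ===== PORT B =====
-- Source B: values = sorted(set(range(1,21)) | set(range(2,41,2)) | set(range(3,61,3)) | {50})
def bVals : List Int :=
  PySem.List.sorted
    (PySem.Set.ofList (PySem.List.pyRange 1 21 1 ++ PySem.List.pyRange 2 41 2 ++
      PySem.List.pyRange 3 61 3 ++ [50])) (fun x => x) false

-- pass 1: mind[t] = 1 + min(mind[t-v] for v in values if v <= t).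
-- Python's min() over that (always nonempty, all elements < 10^9) generator is ported as a
-- fold with init 10^9; exact on every admitted input.
def bMindT (T : Nat) : List Int :=
  (List.range T).foldl (fun md i =>
      md.set (i + 1) (1 + bVals.foldl (fun acc v =>
        if v ≤ ((i : Int) + 1) then min acc (md.getD (i + 1 - v.toNat) 0) else acc) 1000000000))
    ((0 : Int) :: List.replicate T 1000000000)

-- pass 2: cnt[t] = max(cnt[t-v] + (1 if v <= 20 or v == 50 else 0)
--                      for v in values if v <= t and mind[t-v] + 1 == mind[t]).
-- Python's max() over that (always nonempty, all elements ≥ 0) generator is ported as a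
-- fold with init 0; exact on every admitted input.
def bCntT (T : Nat) (md : List Int) : List Int :=
  (List.range T).foldl (fun cn i =>
      cn.set (i + 1) (bVals.foldl (fun acc v =>
        if v ≤ ((i : Int) + 1) ∧ md.getD (i + 1 - v.toNat) 0 + 1 = md.getD (i + 1) 0 then
          max acc (cn.getD (i + 1 - v.toNat) 0 + (if v ≤ 20 ∨ v = 50 then 1 else 0))
        else acc) 0))
    (List.replicate (T + 1) 0)

def solution_alt (target : Int) : List Int :=
  if target < 0 then []   -- Python B raises IndexError here (cnt[target] on an empty cnt); outside Pre_
  else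
    let T := target.toNat
    let md := bMindT T
    let cn := bCntT T md
    [md.getD T 0, cn.getD T 0]

-- ===== PRECONDITION & SPEC =====
-- Pre_ excludes negative targets, on which both Pythons raise IndexError.
def Pre_solution (target : Int) : Prop := 0 ≤ target
instance (target : Int) : Decidable (Pre_solution target) := by unfold Pre_solution; infer_instance

def pvWitness_solution : Int := 7

def Spec_solution (target : Int) (out : List Int) : Prop := out = solution_alt target
instance (target : Int) (out : List Int) : Decidable (Spec_solution target out) := by unfold Spec_solution; infer_instance

-- ===== CLAIM (what is proved, stated in full; the proofs are below) =====
def Claim_equal_solution : Prop := ∀ (target : Int), Dom_solution target → Pre_solution target → Spec_solution target (solution target)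

-- ===== LEMMAS AND PROOFS =====

-- the tie-breaking "min darts, then max count" combine; A's relax steps are instances of it
def cmin (x y : Int × Int) : Int × Int :=
  if y.1 < x.1 then y else if y.1 = x.1 then (x.1, max x.2 y.2) else x

lemma cmin_right_comm (r a b : Int × Int) : cmin (cmin r a) b = cmin (cmin r b) a := by
  unfold cmin
  rcases r with ⟨r1, r2⟩; rcases a with ⟨a1, a2⟩; rcases b with ⟨b1, b2⟩
  simp only
  split_ifs <;> first | rfl | (simp only [Prod.mk.injEq] at *; omega) | (simp at *; try omega)

-- A's movelist in A's per-j order (single j, double 2j, triple 3j for j = 1..20, then the bull)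
def movesA : List (Nat × Int) :=
  ((List.range 20).flatMap (fun j => [(j + 1, (1 : Int)), (2 * (j + 1), (0 : Int)), (3 * (j + 1), (0 : Int))]))
    ++ [(50, (1 : Int))]

-- the same moves grouped by kind; the reference pull DP below runs over this list
def fMoves : List (Nat × Int) :=
  (List.range 20).map (fun s => (s + 1, (1 : Int)))
    ++ (List.range 20).map (fun s => (2 * (s + 1), (0 : Int)))
    ++ (List.range 20).map (fun s => (3 * (s + 1), (0 : Int)))
    ++ [(50, (1 : Int))]

-- reference pull DP: gather the best (min darts, tie: max count) over all predecessors dp[t - v]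
def fBest (dp : List (Int × Int)) (t : Nat) : Int × Int :=
  fMoves.foldl (fun best m =>
    if m.1 ≤ t then
      let p := dp.getD (t - m.1) (0, 0)
      if p.1 + 1 < best.1 then (p.1 + 1, p.2 + m.2)
      else if p.1 + 1 = best.1 then (best.1, max best.2 (p.2 + m.2))
      else best
    else best) ((1000000000 : Int), (0 : Int))

def fTable (T : Nat) : List (Int × Int) :=
  (List.range T).foldl (fun dp i => dp ++ [fBest dp (i + 1)]) [(0, 0)]

-- F t is the final value of cell t of the pull DP
def F (t : Nat) : Int × Int := (fTable t).getD t (0, 0)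

lemma fTable_succ (T : Nat) : fTable (T + 1) = fTable T ++ [fBest (fTable T) (T + 1)] := by
  unfold fTable
  rw [List.range_succ, List.foldl_append]
  rfl

lemma fTable_length (T : Nat) : (fTable T).length = T + 1 := by
  induction T with
  | zero => rfl
  | succ T ih => rw [fTable_succ, List.length_append, ih]; rfl

lemma fTable_getD (T t : Nat) (h : t ≤ T) : (fTable T).getD t (0, 0) = F t := by
  induction T with
  | zero => interval_cases t; rfl
  | succ T ih =>
    rcases Nat.lt_or_ge t (T + 1) with h' | h'
    · rw [fTable_succ, List.getD_append _ _ _ _ (by rw [fTable_length]; omega)]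
      exact ih (by omega)
    · have ht : t = T + 1 := by omega
      subst ht; rfl

lemma F_succ (t : Nat) : F (t + 1) = fBest (fTable t) (t + 1) := by
  unfold F
  rw [fTable_succ, List.getD_eq_getElem?_getD, List.getElem?_append_right (by rw [fTable_length])]
  simp [fTable_length]

-- A's cell t after k outer iterations, expressed with final source values F k
def P (t : Nat) : Nat → Int × Int
  | 0 => if t = 0 then ((0 : Int), (0 : Int)) else ((1000000000 : Int), (0 : Int))
  | (k + 1) => movesA.foldl
      (fun r m => if k + m.1 = t then cmin r ((F k).1 + 1, (F k).2 + m.2) else r) (P t k)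

-- generic relax-with-fresh-read step; aStep is the movesA-fold of it
def relaxGen (T k : Nat) (d : List (Int × Int)) (m : Nat × Int) : List (Int × Int) :=
  aRelax T d (k + m.1) ((d.getD k (0, 0)).1 + 1, (d.getD k (0, 0)).2 + m.2)

lemma aRelax_length (T : Nat) (d : List (Int × Int)) (idx : Nat) (c : Int × Int) :
    (aRelax T d idx c).length = d.length := by
  unfold aRelax; split_ifs <;> simp

lemma aRelax_getD_ne (T : Nat) (d : List (Int × Int)) (idx t : Nat) (c : Int × Int)
    (h : idx ≠ t) : (aRelax T d idx c).getD t (0, 0) = d.getD t (0, 0) := by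
  unfold aRelax
  split_ifs <;> simp [List.getD_eq_getElem?_getD, h]

lemma aRelax_getD_self (T : Nat) (d : List (Int × Int)) (idx : Nat) (c : Int × Int)
    (hT : idx ≤ T) (hl : idx < d.length) :
    (aRelax T d idx c).getD idx (0, 0) = cmin (d.getD idx (0, 0)) c := by
  unfold aRelax cmin
  split_ifs <;> simp_all [List.getD_eq_getElem?_getD, List.getElem?_set] <;> omega

lemma aStep_eq (T i : Nat) (dp : List (Int × Int)) :
    aStep T dp i = movesA.foldl (relaxGen T i) dp := by
  unfold aStep movesA
  rw [List.foldl_append, List.foldl_flatMap]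
  have hbody : ∀ (d : List (Int × Int)) (j : Nat),
      [(j + 1, (1 : Int)), (2 * (j + 1), (0 : Int)), (3 * (j + 1), (0 : Int))].foldl
          (relaxGen T i) d =
        (let src := d.getD i (0, 0)
         let nxt := src.1 + 1
         let d1 := aRelax T d (i + (j + 1)) (nxt, src.2 + 1)
         let d2 := aRelax T d1 (i + 2 * (j + 1)) (nxt, src.2)
         aRelax T d2 (i + 3 * (j + 1)) (nxt, src.2)) := by
    intro d j
    simp only [List.foldl_cons, List.foldl_nil]
    unfold relaxGen
    rw [aRelax_getD_ne T d (i + (j + 1)) i _ (by omega),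
        aRelax_getD_ne T _ (i + 2 * (j + 1)) i _ (by omega),
        aRelax_getD_ne T d (i + (j + 1)) i _ (by omega)]
    simp
  have hfold : ∀ (d : List (Int × Int)),
      (List.range 20).foldl (fun acc j =>
          [(j + 1, (1 : Int)), (2 * (j + 1), (0 : Int)), (3 * (j + 1), (0 : Int))].foldl
            (relaxGen T i) acc) d =
        (List.range 20).foldl (fun dp j =>
          let src := dp.getD i (0, 0)
          let nxt := src.1 + 1
          let dp1 := aRelax T dp (i + (j + 1)) (nxt, src.2 + 1)
          let dp2 := aRelax T dp1 (i + 2 * (j + 1)) (nxt, src.2)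
          aRelax T dp2 (i + 3 * (j + 1)) (nxt, src.2)) d := by
    intro d
    exact PySem.List.foldl_congr_mem _ _ _ _ (fun acc j _ => hbody acc j)
  rw [hfold]
  simp only [List.foldl_cons, List.foldl_nil]
  rfl

-- pointwise reading of a run of relaxGen steps
lemma relax_run_point (T k : Nat) (ms : List (Nat × Int)) :
    ∀ (dp : List (Int × Int)), dp.length = T + 1 → k ≤ T → (∀ m ∈ ms, 1 ≤ m.1) →
      (ms.foldl (relaxGen T k) dp).length = T + 1 ∧
      ∀ t, t ≤ T →
        (ms.foldl (relaxGen T k) dp).getD t (0, 0) =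
          ms.foldl (fun r m => if k + m.1 = t then
              cmin r ((dp.getD k (0, 0)).1 + 1, (dp.getD k (0, 0)).2 + m.2) else r)
            (dp.getD t (0, 0)) := by
  induction ms with
  | nil => intro dp hlen hk _; exact ⟨hlen, fun t _ => rfl⟩
  | cons m ms ih =>
    intro dp hlen hk hpos
    have hm : 1 ≤ m.1 := hpos m (by simp)
    have hlen1 : (relaxGen T k dp m).length = T + 1 := by
      unfold relaxGen; rw [aRelax_length]; exact hlen
    obtain ⟨ihlen, ihpt⟩ := ih (relaxGen T k dp m) hlen1 hk
      (fun m' hm' => hpos m' (by simp [hm']))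
    have hsrc : (relaxGen T k dp m).getD k (0, 0) = dp.getD k (0, 0) := by
      unfold relaxGen; exact aRelax_getD_ne T dp (k + m.1) k _ (by omega)
    refine ⟨ihlen, fun t ht => ?_⟩
    rw [List.foldl_cons, List.foldl_cons, ihpt t ht]
    simp only [hsrc]
    by_cases hhit : k + m.1 = t
    · have hcell : (relaxGen T k dp m).getD t (0, 0) =
          cmin (dp.getD t (0, 0)) ((dp.getD k (0, 0)).1 + 1, (dp.getD k (0, 0)).2 + m.2) := by
        unfold relaxGen
        rw [hhit] at *
        exact aRelax_getD_self T dp t _ ht (by omega)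
      rw [hcell, if_pos hhit]
    · have hcell : (relaxGen T k dp m).getD t (0, 0) = dp.getD t (0, 0) := by
        unfold relaxGen; exact aRelax_getD_ne T dp (k + m.1) t _ hhit
      rw [hcell, if_neg hhit]

-- fold-with-guard = op-fold over the filtered, mapped candidate list (generic loop shape)
lemma foldl_guard {α β : Type} (op : β → α → β) (f : Nat × Int → α) (c : Nat × Int → Prop)
    [DecidablePred c] (L : List (Nat × Int)) (i : β) :
    L.foldl (fun r m => if c m then op r (f m) else r) i =
      ((L.filter (fun m => decide (c m))).map f).foldl op i := by
  induction L generalizing i with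
  | nil => rfl
  | cons m L ih => by_cases h : c m <;> simp [h, ih]

-- same loop shape over the Int value list
lemma foldl_guard_int {α β : Type} (op : β → α → β) (f : Int → α) (c : Int → Prop)
    [DecidablePred c] (L : List Int) (i : β) :
    L.foldl (fun r v => if c v then op r (f v) else r) i =
      ((L.filter (fun v => decide (c v))).map f).foldl op i := by
  induction L generalizing i with
  | nil => rfl
  | cons v L ih => by_cases h : c v <;> simp [h, ih]

lemma onehit {β : Type} (N j : Nat) (x : β) :
    (List.range N).flatMap (fun k => if k = j then [x] else []) = if j < N then [x] else [] := by
  induction N with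
  | zero => simp
  | succ N ih =>
    rw [List.range_succ, List.flatMap_append, ih]
    by_cases h : j < N
    · have : ¬ (N = j) := by omega
      simp [h, this, (by omega : j < N + 1)]
    · by_cases h2 : N = j
      · subst h2; simp [h, (by omega : N < N + 1)]
      · simp [h, h2, (by omega : ¬ (j < N + 1))]; omega

-- the transposition: iterating sources k and firing moves with k + v = N visits, in some order,
-- exactly the moves with v ≤ N (each once)
lemma transpose {β : Type} (φ : Nat × Int → β) (N : Nat) :
    ∀ (ms : List (Nat × Int)), (∀ m ∈ ms, 1 ≤ m.1) →
      ((List.range N).flatMap (fun k =>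
          ms.filterMap (fun m => if k + m.1 = N then some (φ m) else none))).Perm
        (ms.filterMap (fun m => if m.1 ≤ N then some (φ m) else none)) := by
  intro ms
  induction ms with
  | nil => intro _; simp
  | cons m ms ih =>
    intro hpos
    have hm : 1 ≤ m.1 := hpos m (by simp)
    have hrest := ih (fun m' hm' => hpos m' (by simp [hm']))
    have hsplit : ∀ k : Nat,
        List.filterMap (fun m' => if k + m'.1 = N then some (φ m') else none) (m :: ms) =
          (if k + m.1 = N then [φ m] else []) ++
            List.filterMap (fun m' => if k + m'.1 = N then some (φ m') else none) ms := by
      intro k; by_cases h : k + m.1 = N <;> simp [h]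
    simp only [hsplit]
    refine List.Perm.trans (List.flatMap_append_perm (List.range N) _ _).symm ?_
    have hhead : (List.range N).flatMap (fun k => if k + m.1 = N then [φ m] else []) =
        if m.1 ≤ N then [φ m] else [] := by
      by_cases hle : m.1 ≤ N
      · have : ∀ k : Nat, (if k + m.1 = N then [φ m] else []) =
            (if k = N - m.1 then [φ m] else []) := by
          intro k
          by_cases h : k + m.1 = N
          · rw [if_pos h, if_pos (by omega)]
          · rw [if_neg h, if_neg (by omega)]
        simp only [this]
        rw [onehit, if_pos (by omega), if_pos hle]
      · have : ∀ k : Nat, (k ∈ List.range N) →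
            (if k + m.1 = N then [φ m] else ([] : List β)) = [] := by
          intro k hk
          rw [if_neg (by omega)]
        rw [List.flatMap_congr this, if_neg hle]
        simp
    rw [hhead]
    have hgoal : List.filterMap (fun m' => if m'.1 ≤ N then some (φ m') else none) (m :: ms) =
        (if m.1 ≤ N then [φ m] else []) ++
          List.filterMap (fun m' => if m'.1 ≤ N then some (φ m') else none) ms := by
      by_cases h : m.1 ≤ N <;> simp [h]
    rw [hgoal]
    exact hrest.append_left _

-- cmin version of the guard lemma, filterMap form (used with `transpose`)
lemma foldl_if_filterMap (ms : List (Nat × Int)) (c : Nat × Int → Prop) [DecidablePred c]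
    (f : Nat × Int → Int × Int) (r0 : Int × Int) :
    ms.foldl (fun r m => if c m then cmin r (f m) else r) r0 =
      (ms.filterMap (fun m => if c m then some (f m) else none)).foldl cmin r0 := by
  induction ms generalizing r0 with
  | nil => rfl
  | cons m ms ih =>
    by_cases h : c m <;> simp [h, ih]

lemma movesA_pos : ∀ m ∈ movesA, 1 ≤ m.1 := by decide
lemma fMoves_pos : ∀ m ∈ fMoves, 1 ≤ m.1 := by decide
lemma movesA_perm : movesA.Perm fMoves := by decide

-- unrolled form of P
lemma P_unroll (t K : Nat) :
    P t K = (List.range K).foldl (fun r k => movesA.foldl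
      (fun r m => if k + m.1 = t then cmin r ((F k).1 + 1, (F k).2 + m.2) else r) r) (P t 0) := by
  induction K with
  | zero => rfl
  | succ K ih => rw [List.range_succ, List.foldl_append, ← ih]; rfl

-- the heart of the A-side: A's finished cell value equals the pull DP's
lemma P_eq_F (t : Nat) : P t t = F t := by
  cases t with
  | zero => rfl
  | succ n =>
    set t := n + 1 with ht
    have hcand : ∀ (r : Int × Int) (k : Nat),
        movesA.foldl (fun r m => if k + m.1 = t then cmin r ((F k).1 + 1, (F k).2 + m.2) else r) r
          = List.foldl cmin r (movesA.filterMap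
              (fun m => if k + m.1 = t then
                some ((F (t - m.1)).1 + 1, (F (t - m.1)).2 + m.2) else none)) := by
      intro r k
      rw [foldl_if_filterMap movesA (fun m => k + m.1 = t)
          (fun m => ((F k).1 + 1, (F k).2 + m.2)) r]
      congr 1
      apply List.filterMap_congr
      intro m _
      by_cases h : k + m.1 = t
      · rw [if_pos h, if_pos h]
        have hk : k = t - m.1 := by omega
        rw [hk]
      · rw [if_neg h, if_neg h]
    have hperm :
        ((List.range t).flatMap (fun k => movesA.filterMap
            (fun m => if k + m.1 = t then
              some ((F (t - m.1)).1 + 1, (F (t - m.1)).2 + m.2) else none))).Perm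
          (fMoves.filterMap (fun m => if m.1 ≤ t then
            some ((F (t - m.1)).1 + 1, (F (t - m.1)).2 + m.2) else none)) :=
      (transpose (fun m => ((F (t - m.1)).1 + 1, (F (t - m.1)).2 + m.2)) t movesA
          movesA_pos).trans
        (List.Perm.filterMap _ movesA_perm)
    have hinit : P t 0 = ((1000000000 : Int), (0 : Int)) := by simp [P, ht]
    rw [P_unroll]
    simp only [hcand]
    rw [← List.foldl_flatMap,
        List.Perm.foldl_eq (rcomm := ⟨cmin_right_comm⟩) hperm _,
        ← foldl_if_filterMap fMoves (fun m => m.1 ≤ t)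
          (fun m => ((F (t - m.1)).1 + 1, (F (t - m.1)).2 + m.2)) _,
        hinit, ht, F_succ]
    unfold fBest
    apply PySem.List.foldl_congr_mem
    intro acc m hm
    have hm1 : 1 ≤ m.1 := fMoves_pos m hm
    by_cases h : m.1 ≤ n + 1
    · rw [if_pos h, if_pos h, fTable_getD n (n + 1 - m.1) (by omega)]
      simp [cmin]
    · rw [if_neg h, if_neg h]

-- the outer-loop invariant of A
lemma aFold_point (T : Nat) :
    ∀ K, K ≤ T →
      (((List.range K).foldl (aStep T)
          ((List.replicate (T + 1) ((1000000000 : Int), (0 : Int))).set 0 (0, 0))).length = T + 1) ∧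
      ∀ t, t ≤ T →
        ((List.range K).foldl (aStep T)
            ((List.replicate (T + 1) ((1000000000 : Int), (0 : Int))).set 0 (0, 0))).getD t (0, 0)
          = P t K := by
  intro K
  induction K with
  | zero =>
    intro _
    refine ⟨by simp, fun t ht => ?_⟩
    rw [List.range_zero, List.foldl_nil, List.getD_eq_getElem?_getD, List.getElem?_set]
    by_cases h0 : t = 0
    · subst h0
      simp [List.length_replicate, P]
    · have : ¬ ((0 : Nat) = t) := fun h => h0 h.symm
      simp [this, (by omega : t < T + 1), P, h0]
  | succ K ihK =>
    intro hK1
    have hK : K ≤ T := by omega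
    obtain ⟨ihlen, ihpt⟩ := ihK hK
    have hstep : (List.range (K + 1)).foldl (aStep T)
          ((List.replicate (T + 1) ((1000000000 : Int), (0 : Int))).set 0 (0, 0)) =
        movesA.foldl (relaxGen T K) ((List.range K).foldl (aStep T)
          ((List.replicate (T + 1) ((1000000000 : Int), (0 : Int))).set 0 (0, 0))) := by
      rw [List.range_succ, List.foldl_append, List.foldl_cons, List.foldl_nil]
      exact aStep_eq T K _
    obtain ⟨rlen, rpt⟩ := relax_run_point T K movesA _ ihlen hK movesA_pos
    refine ⟨by rw [hstep]; exact rlen, fun t ht => ?_⟩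
    rw [hstep, rpt t ht, ihpt t ht]
    have hsrc : ((List.range K).foldl (aStep T)
        ((List.replicate (T + 1) ((1000000000 : Int), (0 : Int))).set 0 (0, 0))).getD K (0, 0)
          = F K := by
      rw [ihpt K hK, P_eq_F]
    simp only [hsrc]
    rfl

-- A's return value, in terms of the pull DP
lemma solution_eq_F (target : Int) (h : 0 ≤ target) :
    solution target = [(F target.toNat).1, (F target.toNat).2] := by
  unfold solution
  rw [if_neg (by omega)]
  obtain ⟨_, hpt⟩ := aFold_point target.toNat target.toNat (le_refl _)
  have := hpt target.toNat (le_refl _)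
  simp only [this, P_eq_F]

-- ===== the staged reference tables M (min darts) and C (max count) =====

def mTable : Nat → List Int
  | 0 => [0]
  | (t + 1) => mTable t ++ [1 + bVals.foldl (fun acc v =>
      if v ≤ ((t : Int) + 1) then min acc ((mTable t).getD (t + 1 - v.toNat) 0) else acc)
      1000000000]

def M (t : Nat) : Int := (mTable t).getD t 0

def cTable : Nat → List Int
  | 0 => [0]
  | (t + 1) => cTable t ++ [bVals.foldl (fun acc v =>
      if v ≤ ((t : Int) + 1) ∧ M (t + 1 - v.toNat) + 1 = M (t + 1) then
        max acc ((cTable t).getD (t + 1 - v.toNat) 0 + (if v ≤ 20 ∨ v = 50 then 1 else 0))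
      else acc) 0]

def C (t : Nat) : Int := (cTable t).getD t 0

lemma bVals_lit : bVals = [1, 2, 3, 4, 5, 6, 7, 8, 9, 10, 11, 12, 13, 14, 15, 16, 17, 18, 19, 20,
    21, 22, 24, 26, 27, 28, 30, 32, 33, 34, 36, 38, 39, 40, 42, 45, 48, 50, 51, 54, 57, 60] := by
  set_option maxRecDepth 4000 in decide

lemma bVals_pos : ∀ v ∈ bVals, 1 ≤ v := by rw [bVals_lit]; decide

lemma mTable_length (t : Nat) : (mTable t).length = t + 1 := by
  induction t with
  | zero => rfl
  | succ t ih => unfold mTable; rw [List.length_append, ih]; rfl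

lemma mTable_getD (T t : Nat) (h : t ≤ T) : (mTable T).getD t 0 = M t := by
  induction T with
  | zero => interval_cases t; rfl
  | succ T ih =>
    rcases Nat.lt_or_ge t (T + 1) with h' | h'
    · show (mTable (T+1)).getD t 0 = M t
      unfold mTable
      rw [List.getD_append _ _ _ _ (by rw [mTable_length]; omega)]
      exact ih (by omega)
    · have ht : t = T + 1 := by omega
      subst ht; rfl

lemma M_succ (t : Nat) : M (t + 1) = 1 + bVals.foldl (fun acc v =>
    if v ≤ ((t : Int) + 1) then min acc (M (t + 1 - v.toNat)) else acc) 1000000000 := by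
  have : M (t + 1) = (mTable (t + 1)).getD (t + 1) 0 := rfl
  rw [this]
  show (mTable t ++ [_]).getD (t+1) 0 = _
  rw [List.getD_eq_getElem?_getD, List.getElem?_append_right (by rw [mTable_length])]
  simp only [mTable_length, Nat.sub_self, List.getElem?_cons_zero, Option.getD_some]
  refine congrArg (fun x => 1 + x) ?_
  apply PySem.List.foldl_congr_mem
  intro acc v hv
  by_cases h : v ≤ ((t : Int) + 1)
  · rw [if_pos h, if_pos h, mTable_getD t (t + 1 - v.toNat) (by
      have := bVals_pos v hv; omega)]
  · rw [if_neg h, if_neg h]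

lemma cTable_length (t : Nat) : (cTable t).length = t + 1 := by
  induction t with
  | zero => rfl
  | succ t ih => unfold cTable; rw [List.length_append, ih]; rfl

lemma cTable_getD (T t : Nat) (h : t ≤ T) : (cTable T).getD t 0 = C t := by
  induction T with
  | zero => interval_cases t; rfl
  | succ T ih =>
    rcases Nat.lt_or_ge t (T + 1) with h' | h'
    · show (cTable (T+1)).getD t 0 = C t
      unfold cTable
      rw [List.getD_append _ _ _ _ (by rw [cTable_length]; omega)]
      exact ih (by omega)
    · have ht : t = T + 1 := by omega
      subst ht; rfl

lemma C_succ (t : Nat) : C (t + 1) = bVals.foldl (fun acc v =>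
    if v ≤ ((t : Int) + 1) ∧ M (t + 1 - v.toNat) + 1 = M (t + 1) then
      max acc (C (t + 1 - v.toNat) + (if v ≤ 20 ∨ v = 50 then 1 else 0))
    else acc) 0 := by
  have : C (t + 1) = (cTable (t + 1)).getD (t + 1) 0 := rfl
  rw [this]
  show (cTable t ++ [_]).getD (t+1) 0 = _
  rw [List.getD_eq_getElem?_getD, List.getElem?_append_right (by rw [cTable_length])]
  simp only [cTable_length, Nat.sub_self, List.getElem?_cons_zero, Option.getD_some]
  apply PySem.List.foldl_congr_mem
  intro acc v hv
  by_cases h : v ≤ ((t : Int) + 1) ∧ M (t + 1 - v.toNat) + 1 = M (t + 1)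
  · rw [if_pos h, if_pos h, cTable_getD t (t + 1 - v.toNat) (by
      have := bVals_pos v hv; omega)]
  · rw [if_neg h, if_neg h]

-- ===== port-B equals the staged tables =====

lemma bMindT_inv (T : Nat) : ∀ K, K ≤ T →
    (((List.range K).foldl (fun md i =>
        md.set (i + 1) (1 + bVals.foldl (fun acc v =>
          if v ≤ ((i : Int) + 1) then min acc (md.getD (i + 1 - v.toNat) 0) else acc) 1000000000))
      ((0 : Int) :: List.replicate T 1000000000)).length = T + 1) ∧
    ∀ t, t ≤ K →
      ((List.range K).foldl (fun md i =>
        md.set (i + 1) (1 + bVals.foldl (fun acc v =>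
          if v ≤ ((i : Int) + 1) then min acc (md.getD (i + 1 - v.toNat) 0) else acc) 1000000000))
      ((0 : Int) :: List.replicate T 1000000000)).getD t 0 = M t := by
  intro K
  induction K with
  | zero =>
    intro _
    refine ⟨by simp, fun t ht => ?_⟩
    interval_cases t
    rfl
  | succ K ih =>
    intro hK
    obtain ⟨hlen, hpt⟩ := ih (by omega)
    rw [List.range_succ, List.foldl_append, List.foldl_cons, List.foldl_nil]
    refine ⟨by rw [List.length_set]; exact hlen, fun t ht => ?_⟩
    rcases Nat.lt_or_ge t (K + 1) with h' | h'
    · rw [List.getD_eq_getElem?_getD, List.getElem?_set, if_neg (by omega),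
        ← List.getD_eq_getElem?_getD]
      exact hpt t (by omega)
    · have ht' : t = K + 1 := by omega
      subst ht'
      rw [List.getD_eq_getElem?_getD, List.getElem?_set, if_pos rfl,
        if_pos (by rw [hlen]; omega)]
      simp only [Option.getD_some]
      rw [M_succ]
      refine congrArg (fun x => 1 + x) ?_
      apply PySem.List.foldl_congr_mem
      intro acc v hv
      by_cases hg : v ≤ ((K : Int) + 1)
      · rw [if_pos hg, if_pos hg, hpt (K + 1 - v.toNat) (by have := bVals_pos v hv; omega)]
      · rw [if_neg hg, if_neg hg]

lemma bMindT_getD (T : Nat) : ∀ t ≤ T, (bMindT T).getD t 0 = M t := by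
  intro t ht
  exact (bMindT_inv T T (le_refl T)).2 t ht

lemma bCntT_inv (T : Nat) : ∀ K, K ≤ T →
    (((List.range K).foldl (fun cn i =>
        cn.set (i + 1) (bVals.foldl (fun acc v =>
          if v ≤ ((i : Int) + 1) ∧
              (bMindT T).getD (i + 1 - v.toNat) 0 + 1 = (bMindT T).getD (i + 1) 0 then
            max acc (cn.getD (i + 1 - v.toNat) 0 + (if v ≤ 20 ∨ v = 50 then 1 else 0))
          else acc) 0))
      (List.replicate (T + 1) (0 : Int))).length = T + 1) ∧
    ∀ t, t ≤ K →
      ((List.range K).foldl (fun cn i =>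
        cn.set (i + 1) (bVals.foldl (fun acc v =>
          if v ≤ ((i : Int) + 1) ∧
              (bMindT T).getD (i + 1 - v.toNat) 0 + 1 = (bMindT T).getD (i + 1) 0 then
            max acc (cn.getD (i + 1 - v.toNat) 0 + (if v ≤ 20 ∨ v = 50 then 1 else 0))
          else acc) 0))
      (List.replicate (T + 1) (0 : Int))).getD t 0 = C t := by
  intro K
  induction K with
  | zero =>
    intro _
    refine ⟨by simp, fun t ht => ?_⟩
    interval_cases t
    rw [List.range_zero, List.foldl_nil, List.getD_eq_getElem?_getD]
    simp [List.getElem?_replicate]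
    rfl
  | succ K ih =>
    intro hK
    obtain ⟨hlen, hpt⟩ := ih (by omega)
    rw [List.range_succ, List.foldl_append, List.foldl_cons, List.foldl_nil]
    refine ⟨by rw [List.length_set]; exact hlen, fun t ht => ?_⟩
    rcases Nat.lt_or_ge t (K + 1) with h' | h'
    · rw [List.getD_eq_getElem?_getD, List.getElem?_set, if_neg (by omega),
        ← List.getD_eq_getElem?_getD]
      exact hpt t (by omega)
    · have ht' : t = K + 1 := by omega
      subst ht'
      rw [List.getD_eq_getElem?_getD, List.getElem?_set, if_pos rfl,
        if_pos (by rw [hlen]; omega)]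
      simp only [Option.getD_some]
      rw [C_succ]
      apply PySem.List.foldl_congr_mem
      intro acc v hv
      have hpos := bVals_pos v hv
      have hmd1 : (bMindT T).getD (K + 1 - v.toNat) 0 = M (K + 1 - v.toNat) :=
        bMindT_getD T _ (by omega)
      have hmd2 : (bMindT T).getD (K + 1) 0 = M (K + 1) := bMindT_getD T _ (by omega)
      rw [hmd1, hmd2]
      by_cases hg : v ≤ ((K : Int) + 1) ∧ M (K + 1 - v.toNat) + 1 = M (K + 1)
      · rw [if_pos hg, if_pos hg, hpt (K + 1 - v.toNat) (by omega)]
      · rw [if_neg hg, if_neg hg]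

lemma bCntT_getD (T : Nat) : ∀ t ≤ T, (bCntT T (bMindT T)).getD t 0 = C t := by
  intro t ht
  exact (bCntT_inv T T (le_refl T)).2 t ht

-- ===== characterization of the cmin fold, and the fold-comparison lemmas =====

lemma cmin_fst (x y : Int × Int) : (cmin x y).1 = min x.1 y.1 := by
  rcases x with ⟨a, b⟩; rcases y with ⟨c, d⟩
  unfold cmin; dsimp only; split_ifs <;> dsimp only <;> omega

lemma cmin_snd (x y : Int × Int) :
    (cmin x y).2 = if y.1 < x.1 then y.2 else if y.1 = x.1 then max x.2 y.2 else x.2 := by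
  rcases x with ⟨a, b⟩; rcases y with ⟨c, d⟩
  unfold cmin; dsimp only; split_ifs <;> rfl

lemma cmin_fold_char (L : List (Int × Int)) :
    ∀ (r0 : Int × Int), (∀ p ∈ L, 0 ≤ p.2) → 0 ≤ r0.2 →
    (L.foldl cmin r0).1 = (L.map Prod.fst).foldl min r0.1 ∧
    ∀ m, m = (L.map Prod.fst).foldl min r0.1 →
      (L.foldl cmin r0).2 = L.foldl (fun a p => if p.1 = m then max a p.2 else a)
        (if r0.1 = m then r0.2 else 0) := by
  induction L with
  | nil =>
    intro r0 _ _
    refine ⟨rfl, fun m hm => ?_⟩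
    simp only [List.map_nil, List.foldl_nil] at hm ⊢
    rw [hm]
    simp
  | cons p L ih =>
    intro r0 hL h0
    have hp : 0 ≤ p.2 := hL p (by simp)
    have hL' : ∀ q ∈ L, 0 ≤ q.2 := fun q hq => hL q (by simp [hq])
    have h0' : 0 ≤ (cmin r0 p).2 := by
      rw [cmin_snd]; split_ifs <;> omega
    obtain ⟨ih1, ih2⟩ := ih (cmin r0 p) hL' h0'
    refine ⟨by simp only [List.foldl_cons, List.map_cons, ih1, cmin_fst], ?_⟩
    intro m hm
    simp only [List.map_cons, List.foldl_cons] at hm ⊢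
    have hm' : m = (L.map Prod.fst).foldl min (cmin r0 p).1 := by rw [cmin_fst]; exact hm
    rw [ih2 m hm']
    congr 1
    have hmle : m ≤ min r0.1 p.1 := by
      rw [hm]; exact (PySem.List.foldl_min_le _ _).1
    rw [cmin_fst, cmin_snd]
    split_ifs <;> omega

lemma foldl_min_eq_of (L1 L2 : List Int) (i j : Int)
    (h12 : ∀ x ∈ L1, ∃ y ∈ L2, y ≤ x) (h21 : ∀ y ∈ L2, ∃ x ∈ L1, x ≤ y)
    (hx : ∃ x ∈ L1, x ≤ min i j) :
    L1.foldl min i = L2.foldl min j := by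
  obtain ⟨x0, hx0, hx0le⟩ := hx
  apply le_antisymm
  · rcases PySem.List.foldl_min_mem L2 j with hb | hb
    · rw [hb]
      calc L1.foldl min i ≤ x0 := (PySem.List.foldl_min_le _ _).2 x0 hx0
        _ ≤ min i j := hx0le
        _ ≤ j := min_le_right _ _
    · obtain ⟨x, hx, hxle⟩ := h21 _ hb
      calc L1.foldl min i ≤ x := (PySem.List.foldl_min_le _ _).2 x hx
        _ ≤ L2.foldl min j := hxle
  · rcases PySem.List.foldl_min_mem L1 i with ha | ha
    · rw [ha]
      obtain ⟨y, hy, hyle⟩ := h12 _ hx0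
      calc L2.foldl min j ≤ y := (PySem.List.foldl_min_le _ _).2 y hy
        _ ≤ x0 := hyle
        _ ≤ min i j := hx0le
        _ ≤ i := min_le_left _ _
    · obtain ⟨y, hy, hyle⟩ := h12 _ ha
      calc L2.foldl min j ≤ y := (PySem.List.foldl_min_le _ _).2 y hy
        _ ≤ L1.foldl min i := hyle

lemma foldl_max_eq_of (L1 L2 : List Int) (i : Int)
    (h12 : ∀ x ∈ L1, ∃ y ∈ L2, x ≤ y) (h21 : ∀ y ∈ L2, ∃ x ∈ L1, y ≤ x) :
    L1.foldl max i = L2.foldl max i := by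
  apply le_antisymm
  · rcases PySem.List.foldl_max_mem L1 i with ha | ha
    · rw [ha]; exact (PySem.List.le_foldl_max _ _).1
    · obtain ⟨y, hy, hle⟩ := h12 _ ha
      exact le_trans hle ((PySem.List.le_foldl_max _ _).2 y hy)
  · rcases PySem.List.foldl_max_mem L2 i with hb | hb
    · rw [hb]; exact (PySem.List.le_foldl_max _ _).1
    · obtain ⟨x, hx, hle⟩ := h21 _ hb
      exact le_trans hle ((PySem.List.le_foldl_max _ _).2 x hx)

lemma foldl_min_shift (L : List Int) : ∀ i : Int,
    (L.map (· + 1)).foldl min (i + 1) = (L.foldl min i) + 1 := by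
  induction L with
  | nil => intro i; rfl
  | cons x L ih =>
    intro i
    simp only [List.map_cons, List.foldl_cons]
    have hmin : min (i + 1) (x + 1) = min i x + 1 := by omega
    rw [hmin, ih]

-- move-table facts linking A's move list to the deduplicated value list
lemma fMoves_val_mem : ∀ m ∈ fMoves, ((m.1 : Int)) ∈ bVals := by
  rw [bVals_lit]; decide

lemma fMoves_inc_le : ∀ m ∈ fMoves, m.2 ≤ (if (m.1 : Int) ≤ 20 ∨ (m.1 : Int) = 50 then 1 else 0) := by
  decide

lemma bVals_mem_moves : ∀ v ∈ bVals, ∃ m ∈ fMoves,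
    (m.1 : Int) = v ∧ m.2 = (if v ≤ 20 ∨ v = 50 then 1 else 0) := by
  rw [bVals_lit]; decide

-- bounds on M
set_option maxRecDepth 4000 in
lemma M_step (s : Nat) (v : Int) (hv : v ∈ bVals) (hle : v ≤ (s : Int)) :
    M s ≤ M (s - v.toNat) + 1 := by
  have hv1 : 1 ≤ v := bVals_pos v hv
  match s with
  | 0 => omega
  | (n + 1) =>
    rw [M_succ, foldl_guard_int min (fun v => M (n + 1 - v.toNat)) (fun v => v ≤ ((n : Int) + 1))]
    have hmem : M (n + 1 - v.toNat) ∈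
        ((bVals.filter (fun v => decide (v ≤ ((n : Int) + 1)))).map
          (fun v => M (n + 1 - v.toNat))) := by
      refine List.mem_map.2 ⟨v, List.mem_filter.2 ⟨hv, ?_⟩, rfl⟩
      rw [decide_eq_true_iff]
      push_cast at hle
      omega
    have := (PySem.List.foldl_min_le
      ((bVals.filter (fun v => decide (v ≤ ((n : Int) + 1)))).map
        (fun v => M (n + 1 - v.toNat))) 1000000000).2 _ hmem
    omega

lemma mem_bVals_le20 (v : Int) (h1 : 1 ≤ v) (h2 : v ≤ 20) : v ∈ bVals := by
  rw [bVals_lit]; interval_cases v <;> decide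

lemma M_zero : M 0 = 0 := rfl

lemma M_le_one (s : Nat) (h1 : 1 ≤ s) (h2 : s ≤ 20) : M s ≤ 1 := by
  have := M_step s (s : Int) (mem_bVals_le20 _ (by omega) (by omega)) (le_refl _)
  rw [Int.toNat_natCast, Nat.sub_self, M_zero] at this
  omega

lemma M_le_two (s : Nat) (h : s ≤ 59) : M s ≤ 2 := by
  rcases Nat.lt_or_ge s 1 with h1 | h1
  · have : s = 0 := by omega
    rw [this, M_zero]; omega
  rcases Nat.lt_or_ge s 21 with h2 | h2
  · have := M_le_one s h1 (by omega); omega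
  rcases Nat.lt_or_ge s 41 with h3 | h3
  · have hstep := M_step s 20 (mem_bVals_le20 20 (by omega) (by omega)) (by omega)
    rw [show (20 : Int).toNat = 20 from rfl] at hstep
    have : M (s - 20) ≤ 1 := M_le_one _ (by omega) (by omega)
    omega
  · have hstep := M_step s 39 (by rw [bVals_lit]; decide) (by omega)
    rw [show (39 : Int).toNat = 39 from rfl] at hstep
    have : M (s - 39) ≤ 1 := M_le_one _ (by omega) (by omega)
    omega

lemma M_bound (s : Nat) : M s ≤ (s : Int) / 60 + 2 := by
  induction s using Nat.strong_induction_on with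
  | _ s ih =>
    rcases Nat.lt_or_ge s 60 with h | h
    · have := M_le_two s (by omega)
      omega
    · have hstep := M_step s 60 (by rw [bVals_lit]; decide) (by omega)
      rw [show (60 : Int).toNat = 60 from rfl] at hstep
      have hrec := ih (s - 60) (by omega)
      have hcast : (((s - 60 : Nat)) : Int) = (s : Int) - 60 := by omega
      rw [hcast] at hrec
      omega

lemma C_nonneg (s : Nat) : 0 ≤ C s := by
  match s with
  | 0 => exact le_refl 0
  | (n + 1) =>
    rw [C_succ, foldl_guard_int max
      (fun v => C (n + 1 - v.toNat) + (if v ≤ 20 ∨ v = 50 then 1 else 0))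
      (fun v => v ≤ ((n : Int) + 1) ∧ M (n + 1 - v.toNat) + 1 = M (n + 1))]
    exact (PySem.List.le_foldl_max _ _).1

lemma fMoves_inc_nonneg : ∀ m ∈ fMoves, 0 ≤ m.2 := by decide

lemma one_mem_fMoves : ((1 : Nat), (1 : Int)) ∈ fMoves := by decide

-- selection fold over a mapped pair list = max fold over the filtered second components
lemma foldl_sel_map {α : Type} (l : List α) (f : α → Int × Int) (m0 : Int) :
    ∀ i : Int, (l.map f).foldl (fun a p => if p.1 = m0 then max a p.2 else a) i
      = ((l.filter (fun x => decide ((f x).1 = m0))).map (fun x => (f x).2)).foldl max i := by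
  induction l with
  | nil => intro i; rfl
  | cons x l ihl =>
    intro i
    by_cases h : (f x).1 = m0 <;> simp [h, ihl]

-- ===== the core theorem: the pull DP equals the staged tables =====

set_option maxRecDepth 8000 in
lemma F_eq_MC : ∀ t : Nat, (t : Int) ≤ 2147483648 → F t = (M t, C t) := by
  intro t
  induction t using Nat.strong_induction_on with
  | _ t ih =>
    intro ht
    cases t with
    | zero => rfl
    | succ n =>
      -- abbreviations for the candidate lists
      set s := n + 1 with hs
      have hcast : ∀ k : Nat, k ≤ s → ((k : Nat) : Int) ≤ 2147483648 := by
        intro k hk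
        have : ((k : Nat) : Int) ≤ ((s : Nat) : Int) := by exact_mod_cast hk
        omega
      -- Step 1: F s as a cmin fold over A's per-move candidate list in M/C terms
      have h2 : F s = fMoves.foldl (fun best m => if m.1 ≤ s then
          cmin best (M (s - m.1) + 1, C (s - m.1) + m.2) else best)
          ((1000000000 : Int), (0 : Int)) := by
        rw [F_succ]
        show fMoves.foldl _ _ = _
        apply PySem.List.foldl_congr_mem
        intro best m hm
        have hm1 := fMoves_pos m hm
        by_cases h : m.1 ≤ s
        · rw [if_pos h, if_pos h, fTable_getD n (s - m.1) (by omega),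
            ih (s - m.1) (by omega) (hcast _ (by omega))]
          rfl
        · rw [if_neg h, if_neg h]
      have h3 := foldl_guard cmin (fun m => (M (s - m.1) + 1, C (s - m.1) + m.2))
        (fun m : Nat × Int => m.1 ≤ s) fMoves ((1000000000 : Int), (0 : Int))
      set LM := ((fMoves.filter (fun m => decide (m.1 ≤ s))).map
        (fun m => (M (s - m.1) + 1, C (s - m.1) + m.2))) with hLM
      have hFs : F s = LM.foldl cmin ((1000000000 : Int), (0 : Int)) := by
        rw [h2, h3]
      -- Step 2: characterize the cmin fold
      have hnn : ∀ p ∈ LM, 0 ≤ p.2 := by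
        intro p hp
        rw [hLM] at hp
        obtain ⟨m, hmf, hpe⟩ := List.mem_map.1 hp
        obtain ⟨hmem, _⟩ := List.mem_filter.1 hmf
        rw [← hpe]
        have := C_nonneg (s - m.1)
        have := fMoves_inc_nonneg m hmem
        dsimp only
        omega
      obtain ⟨hchar1, hchar2⟩ := cmin_fold_char LM ((1000000000 : Int), (0 : Int)) hnn (by norm_num)
      -- Step 3: the min component equals M s
      have hL1 : LM.map Prod.fst = (fMoves.filter (fun m => decide (m.1 ≤ s))).map
          (fun m => M (s - m.1) + 1) := by
        rw [hLM, List.map_map]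
        rfl
      have hMs : M s = 1 + ((bVals.filter (fun v => decide (v ≤ ((n : Int) + 1)))).map
          (fun v => M (s - v.toNat))).foldl min 1000000000 := by
        rw [hs, M_succ, foldl_guard_int min (fun v => M (n + 1 - v.toNat))
          (fun v => v ≤ ((n : Int) + 1))]
      have hmin : (LM.map Prod.fst).foldl min 1000000000 = M s := by
        rw [hL1, hMs, add_comm (1 : Int), ← foldl_min_shift, List.map_map]
        apply foldl_min_eq_of
        · -- every per-move candidate appears among the per-value candidates
          intro x hx
          obtain ⟨m, hmf, hxe⟩ := List.mem_map.1 hx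
          obtain ⟨hmem, hguard⟩ := List.mem_filter.1 hmf
          rw [decide_eq_true_iff] at hguard
          refine ⟨x, List.mem_map.2 ⟨(m.1 : Int), List.mem_filter.2 ⟨fMoves_val_mem m hmem, ?_⟩, ?_⟩, le_refl x⟩
          · rw [decide_eq_true_iff]
            push_cast
            omega
          · rw [← hxe]
            show M (s - ((m.1 : Int)).toNat) + 1 = M (s - m.1) + 1
            rw [Int.toNat_natCast]
        · -- and conversely
          intro y hy
          obtain ⟨v, hvf, hye⟩ := List.mem_map.1 hy
          obtain ⟨hvmem, hguard⟩ := List.mem_filter.1 hvf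
          rw [decide_eq_true_iff] at hguard
          obtain ⟨m, hmem, hmv, _⟩ := bVals_mem_moves v hvmem
          have hm1 : m.1 = v.toNat := by omega
          refine ⟨y, List.mem_map.2 ⟨m, List.mem_filter.2 ⟨hmem, ?_⟩, ?_⟩, le_refl y⟩
          · rw [decide_eq_true_iff]
            omega
          · rw [← hye, hm1]
            simp only [Function.comp_apply]
        · -- a candidate below the fold inits: the single 1
          refine ⟨M (s - 1) + 1, List.mem_map.2 ⟨((1 : Nat), (1 : Int)),
            List.mem_filter.2 ⟨one_mem_fMoves, by rw [decide_eq_true_iff]; omega⟩, rfl⟩, ?_⟩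
          have hb := M_bound (s - 1)
          have hc : (((s - 1 : Nat)) : Int) ≤ 2147483648 := hcast _ (by omega)
          omega
      -- Step 4: the count component equals C s
      have hCs : C s = ((bVals.filter (fun v => decide (v ≤ ((n : Int) + 1) ∧
            M (s - v.toNat) + 1 = M s))).map
            (fun v => C (s - v.toNat) + (if v ≤ 20 ∨ v = 50 then 1 else 0))).foldl max 0 := by
        rw [hs, C_succ, foldl_guard_int max
          (fun v => C (n + 1 - v.toNat) + (if v ≤ 20 ∨ v = 50 then 1 else 0))
          (fun v => v ≤ ((n : Int) + 1) ∧ M (n + 1 - v.toNat) + 1 = M (n + 1))]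
      have hsel := hchar2 (M s) hmin.symm
      have hinit : (if (1000000000 : Int) = M s then (0 : Int) else 0) = 0 := by
        split_ifs <;> rfl
      rw [hinit] at hsel
      rw [hLM, foldl_sel_map (fMoves.filter (fun m => decide (m.1 ≤ s)))
        (fun m => (M (s - m.1) + 1, C (s - m.1) + m.2)) (M s) 0] at hsel
      have hcnt : (LM.foldl cmin ((1000000000 : Int), (0 : Int))).2 = C s := by
        rw [hsel, hCs]
        apply foldl_max_eq_of
        · intro x hx
          obtain ⟨m, hmf, hxe⟩ := List.mem_map.1 hx
          obtain ⟨hmf1, hguard2⟩ := List.mem_filter.1 hmf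
          obtain ⟨hmem, hguard1⟩ := List.mem_filter.1 hmf1
          rw [decide_eq_true_iff] at hguard1 hguard2
          dsimp only at hguard2
          refine ⟨C (s - m.1) + (if (m.1 : Int) ≤ 20 ∨ (m.1 : Int) = 50 then 1 else 0),
            List.mem_map.2 ⟨(m.1 : Int), List.mem_filter.2 ⟨fMoves_val_mem m hmem, ?_⟩, ?_⟩, ?_⟩
          · rw [decide_eq_true_iff, Int.toNat_natCast]
            constructor
            · push_cast; omega
            · exact hguard2
          · rw [Int.toNat_natCast]
          · rw [← hxe]
            have := fMoves_inc_le m hmem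
            dsimp only
            omega
        · intro y hy
          obtain ⟨v, hvf, hye⟩ := List.mem_map.1 hy
          obtain ⟨hvmem, hguard⟩ := List.mem_filter.1 hvf
          rw [decide_eq_true_iff] at hguard
          obtain ⟨m, hmem, hmv, hminc⟩ := bVals_mem_moves v hvmem
          have hm1 : m.1 = v.toNat := by omega
          refine ⟨C (s - m.1) + m.2, List.mem_map.2 ⟨m, List.mem_filter.2
            ⟨List.mem_filter.2 ⟨hmem, ?_⟩, ?_⟩, rfl⟩, ?_⟩
          · rw [decide_eq_true_iff]
            omega
          · rw [decide_eq_true_iff]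
            dsimp only
            rw [hm1]
            exact hguard.2
          · rw [← hye, hm1, hminc]
      -- assemble
      rw [hFs]
      exact Prod.ext (by rw [hchar1, hmin]) hcnt

-- ===== VERDICT (by name: the statement is the Claim_ definition above) =====
theorem solution_spec : Claim_equal_solution := by
  intro target hdom hpre
  unfold Pre_solution at hpre
  unfold Dom_solution pvDomInt at hdom
  rw [decide_eq_true_iff] at hdom
  unfold Spec_solution
  rw [solution_eq_F target hpre]
  unfold solution_alt
  rw [if_neg (by omega)]
  have hT : ((target.toNat : Nat) : Int) ≤ 2147483648 := by omega
  rw [F_eq_MC target.toNat hT]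
  show [M target.toNat, C target.toNat] =
    [(bMindT target.toNat).getD target.toNat 0,
     (bCntT target.toNat (bMindT target.toNat)).getD target.toNat 0]
  rw [bMindT_getD target.toNat target.toNat (le_refl _),
      bCntT_getD target.toNat target.toNat (le_refl _)]
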